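-- pv_equiv track=rewrite | github.com/Inesculent/Bushwhack | src/orchestration/nodes/application/planner.py | _extract_files_from_diff
-- ===== SOURCE A (Python) =====
-- from typing import Any, Dict, Iterable, List
--
-- def _dedupe_preserve_order(values: Iterable[str]) -> List[str]:
--     seen: set[str] = set()
--     out: List[str] = []
--     for value in values:
--         normalized = value.strip().replace("\\", "/")
--         if not normalized or normalized in seen:
--             continue
--         seen.add(normalized)
--         out.append(normalized)
--     return out
--
-- def _extract_files_from_diff(git_diff: str) -> List[str]:
--     file_paths: List[str] = []
--     for line in git_diff.splitlines():
--         if line.startswith("+++ b/"):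
--             file_paths.append(line.removeprefix("+++ b/"))
--         elif line.startswith("--- a/"):
--             file_paths.append(line.removeprefix("--- a/"))
--         elif line.startswith("diff --git "):
--             parts = line.split()
--             if len(parts) >= 4 and parts[3].startswith("b/"):
--                 file_paths.append(parts[3].removeprefix("b/"))
--     return _dedupe_preserve_order(path for path in file_paths if path != "/dev/null")
-- ===== SOURCE B (Python) =====
-- from typing import List, Optional
--
--
-- def _match_path(line: str) -> Optional[str]:
--     if line.startswith("+++ b/"):
--         return line[6:]
--     if line.startswith("--- a/"):
--         return line[6:]
--     if line.startswith("diff --git "):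
--         parts = line.split()
--         if len(parts) >= 4 and parts[3].startswith("b/"):
--             return parts[3][2:]
--     return None
--
--
-- def _extract_files_from_diff(git_diff: str) -> List[str]:
--     # Build the answer back-to-front: walk the lines in REVERSE, and when a path
--     # is found, prepend it and delete any later duplicate from the list built so
--     # far.  First occurrences win without ever maintaining a 'seen' set.
--     out: List[str] = []
--     for line in reversed(git_diff.splitlines()):
--         raw = _match_path(line)
--         if raw is None or raw == "/dev/null":
--             continue
--         normalized = raw.strip().replace("\\", "/")
--         if normalized:
--             out = [normalized] + [x for x in out if x != normalized]
--     return out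
-- ===== Notes on version B (the rewrite author's own statement) =====
-- stated objective: alternative
-- what changed: Replaces A's forward collect-then-dedupe passes with a backwards traversal that builds the result back-to-front and removes later duplicates by filtering the partial result on each prepend, so no 'seen' set and no intermediate path list exist.
import Mathlib
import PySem

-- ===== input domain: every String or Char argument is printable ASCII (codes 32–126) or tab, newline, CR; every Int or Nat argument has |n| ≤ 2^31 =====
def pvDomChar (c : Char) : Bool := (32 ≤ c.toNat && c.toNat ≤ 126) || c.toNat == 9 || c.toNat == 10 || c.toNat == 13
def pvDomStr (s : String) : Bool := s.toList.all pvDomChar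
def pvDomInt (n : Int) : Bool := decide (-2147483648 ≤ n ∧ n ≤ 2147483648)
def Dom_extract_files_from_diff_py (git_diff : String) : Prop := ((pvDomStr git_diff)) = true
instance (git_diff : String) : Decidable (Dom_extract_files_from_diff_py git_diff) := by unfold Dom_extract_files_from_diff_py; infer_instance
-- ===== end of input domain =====

-- B walks the lines BACKWARDS, building the result back-to-front and deleting later
-- duplicates by filtering the partial result — no 'seen' set and no intermediate path
-- list (objective: alternative; not claimed faster).

-- ===== PORT A =====
-- str.removeprefix (not in PySem): returns s with p removed if s starts with p, else s — exact.
def removeprefix_py (s p : String) : String :=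
  if PySem.Str.startswith s p then PySem.Str.slice s (some (PySem.Str.len p)) none else s

-- the loop body of _dedupe_preserve_order (state = (seen, out))
def d_step (st : PySem.Set String × List String) (value : String) :
    PySem.Set String × List String :=
  if PySem.Str.replace (PySem.Str.strip value) "\\" "/" = ""
      ∨ PySem.Str.replace (PySem.Str.strip value) "\\" "/" ∈ st.1 then st
  else (PySem.Set.add st.1 (PySem.Str.replace (PySem.Str.strip value) "\\" "/"),
        st.2 ++ [PySem.Str.replace (PySem.Str.strip value) "\\" "/"])

def dedupe_preserve_order_py (values : List String) : List String :=
  (values.foldl d_step (PySem.Set.empty, [])).2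

-- the loop body of A's collection loop over the lines
def a_step (acc : List String) (line : String) : List String :=
  if PySem.Str.startswith line "+++ b/" then acc ++ [removeprefix_py line "+++ b/"]
  else if PySem.Str.startswith line "--- a/" then acc ++ [removeprefix_py line "--- a/"]
  else if PySem.Str.startswith line "diff --git " then
    let parts := PySem.Str.split₀ line
    if PySem.List.len parts ≥ 4 ∧ PySem.Str.startswith (PySem.List.pyGetD parts 3 "") "b/" then
      acc ++ [removeprefix_py (PySem.List.pyGetD parts 3 "") "b/"]
    else acc
  else acc

def extract_files_from_diff_py (git_diff : String) : List String :=
  let file_paths := (PySem.Str.splitlines git_diff).foldl a_step []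
  dedupe_preserve_order_py (file_paths.filter (fun p => p != "/dev/null"))

-- ===== PORT B =====
-- Source B's _match_path helper
def match_path_py (line : String) : Option String :=
  if PySem.Str.startswith line "+++ b/" then some (PySem.Str.slice line (some 6) none)
  else if PySem.Str.startswith line "--- a/" then some (PySem.Str.slice line (some 6) none)
  else if PySem.Str.startswith line "diff --git " then
    let parts := PySem.Str.split₀ line
    if PySem.List.len parts ≥ 4 ∧ PySem.Str.startswith (PySem.List.pyGetD parts 3 "") "b/" then
      some (PySem.Str.slice (PySem.List.pyGetD parts 3 "") (some 2) none)
    else none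
  else none

-- Source B's backwards loop body: prepend the path, filtering later duplicates out
def b_step (out : List String) (line : String) : List String :=
  match match_path_py line with
  | none => out
  | some raw =>
    if raw = "/dev/null" then out
    else if PySem.Str.replace (PySem.Str.strip raw) "\\" "/" = "" then out
    else PySem.Str.replace (PySem.Str.strip raw) "\\" "/"
      :: out.filter (fun x => x ≠ PySem.Str.replace (PySem.Str.strip raw) "\\" "/")

def extract_files_from_diff_py_alt (git_diff : String) : List String :=
  ((PySem.Str.splitlines git_diff).reverse).foldl b_step []

-- ===== PRECONDITION & SPEC =====
def Spec_extract_files_from_diff_py (git_diff : String) (out : List String) : Prop := out = extract_files_from_diff_py_alt git_diff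
instance (git_diff : String) (out : List String) : Decidable (Spec_extract_files_from_diff_py git_diff out) := by unfold Spec_extract_files_from_diff_py; infer_instance

-- ===== CLAIM (what is proved, stated in full; the proofs are below) =====
def Claim_equal_extract_files_from_diff_py : Prop := ∀ (git_diff : String), Dom_extract_files_from_diff_py git_diff → Spec_extract_files_from_diff_py git_diff (extract_files_from_diff_py git_diff)

-- ===== LEMMAS AND PROOFS =====
-- the normalized, nonempty-path stream of a list of raw values
def nrm (v : String) : String := PySem.Str.replace (PySem.Str.strip v) "\\" "/"

def nsv (vs : List String) : List String :=
  vs.flatMap (fun v => if nrm v = "" then [] else [nrm v])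

-- first-occurrence dedup expressed by prepending and filtering (the shape of B's fold)
def g : List String → List String
  | [] => []
  | n :: t => n :: (g t).filter (fun x => x ≠ n)

theorem g_cons (n : String) (t : List String) :
    g (n :: t) = n :: (g t).filter (fun x => x ≠ n) := rfl

theorem filter_swap (p q : String → Bool) (l : List String) :
    (l.filter q).filter p = (l.filter p).filter q := by
  rw [List.filter_filter, List.filter_filter]
  exact List.filter_congr (fun a _ => Bool.and_comm _ _)

theorem filter_idem (p : String → Bool) (l : List String) :
    (l.filter p).filter p = l.filter p := by
  rw [List.filter_filter]
  exact List.filter_congr (fun a _ => Bool.and_self _)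

theorem filter_g (a : String) (xs : List String) :
    (g xs).filter (fun x => x ≠ a) = g (xs.filter (fun x => x ≠ a)) := by
  induction xs with
  | nil => rfl
  | cons b t ih =>
    show (b :: (g t).filter (fun x => decide (x ≠ b))).filter (fun x => decide (x ≠ a)) = _
    by_cases hb : b = a
    · subst hb
      rw [List.filter_cons_of_neg (by simp), filter_swap, filter_idem, ih]
      simp
    · rw [List.filter_cons_of_pos (by simp [hb]), filter_swap, ih,
        List.filter_cons_of_pos (by simp [hb])]
      rfl

theorem d_step_eq (st : PySem.Set String × List String) (v : String) :
    d_step st v = if nrm v = "" ∨ nrm v ∈ st.1 then st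
      else (PySem.Set.add st.1 (nrm v), st.2 ++ [nrm v]) := rfl

-- A's dedupe fold, with any seen-set s, computes out ++ g (stream minus s)
theorem dedupe_inv (vs : List String) (s : PySem.Set String) (out : List String) :
    (vs.foldl d_step (s, out)).2
      = out ++ g ((nsv vs).filter (fun x => decide (x ∉ s))) := by
  induction vs generalizing s out with
  | nil => simp [nsv, g]
  | cons v t ih =>
    rw [List.foldl_cons, d_step_eq]
    have hstream : nsv (v :: t) = (if nrm v = "" then [] else [nrm v]) ++ nsv t := by
      simp [nsv]
    by_cases h0 : nrm v = ""
    · rw [if_pos (Or.inl h0), ih, hstream, if_pos h0, List.nil_append]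
    · by_cases hs : nrm v ∈ s
      · rw [if_pos (Or.inr hs), ih, hstream, if_neg h0, List.singleton_append,
          List.filter_cons_of_neg (by simp [hs])]
      · rw [if_neg (fun hc => hc.elim h0 hs), ih, hstream, if_neg h0,
          List.singleton_append, List.filter_cons_of_pos (by simp [hs]),
          List.append_assoc, List.singleton_append, g_cons, filter_g,
          List.filter_filter]
        exact congrArg (out ++ ·) (congrArg (nrm v :: ·) (congrArg g
          (List.filter_congr fun x _ => by
            by_cases h1 : x ∈ s <;> by_cases h2 : x = nrm v <;>
              simp [PySem.Set.mem_add, h1, h2])))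

-- A's per-line collection step appends exactly the (0 or 1) raw path B's _match_path finds.
theorem a_step_eq (acc : List String) (line : String) :
    a_step acc line = acc ++ (match_path_py line).toList := by
  unfold a_step match_path_py removeprefix_py
  split_ifs with h1 h2 h3 <;> simp_all [PySem.Str.len, PySem.Str.startswith]
  split <;> simp_all

theorem foldl_a_step (lines : List String) (acc : List String) :
    lines.foldl a_step acc = acc ++ lines.flatMap (fun l => (match_path_py l).toList) := by
  induction lines generalizing acc with
  | nil => simp
  | cons l ls ih =>
    rw [List.foldl_cons, a_step_eq, ih, List.flatMap_cons, List.append_assoc]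

-- the whole normalized stream of the lines
def nsl (lines : List String) : List String :=
  nsv (((lines.flatMap (fun l => (match_path_py l).toList)).filter (fun p => p != "/dev/null")))

-- A's result is g of that stream
theorem a_char (lines : List String) :
    dedupe_preserve_order_py
      ((lines.foldl a_step []).filter (fun p => p != "/dev/null")) = g (nsl lines) := by
  unfold dedupe_preserve_order_py
  rw [foldl_a_step, List.nil_append, dedupe_inv]
  unfold nsl
  rw [List.nil_append]
  congr 1
  refine List.filter_eq_self.2 (fun x _ => ?_)
  simp [PySem.Set.empty]

-- B's backwards fold is g of the same stream
theorem b_char (lines : List String) :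
    (lines.reverse).foldl b_step [] = g (nsl lines) := by
  rw [List.foldl_reverse]
  induction lines with
  | nil => rfl
  | cons l ls ih =>
    rw [List.foldr_cons, ih]
    cases h : match_path_py l with
    | none =>
      simp only [b_step, h]
      simp [nsl, nsv, List.flatMap_cons, h]
    | some raw =>
      simp only [b_step, h]
      by_cases hd : raw = "/dev/null"
      · rw [if_pos hd]
        simp [nsl, nsv, List.flatMap_cons, h, hd]
      · rw [if_neg hd]
        by_cases h0 : PySem.Str.replace (PySem.Str.strip raw) "\\" "/" = ""
        · rw [if_pos h0]
          simp [nsl, nsv, List.flatMap_cons, h, hd, nrm, h0]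
        · rw [if_neg h0]
          rw [show nsl (l :: ls) = nrm raw :: nsl ls from by
            simp [nsl, nsv, List.flatMap_cons, h, hd, nrm, h0]]
          rfl

-- ===== VERDICT (by name: the statement is the Claim_ definition above) =====
theorem extract_files_from_diff_py_spec : Claim_equal_extract_files_from_diff_py := by
  intro git_diff _
  unfold Spec_extract_files_from_diff_py extract_files_from_diff_py extract_files_from_diff_py_alt
  rw [a_char, b_char]
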